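-- pv_equiv track=rewrite | github.com/EverettDW/roleplay | menu_sel.py | menu_sel
-- ===== SOURCE A (Python) =====
-- def menu_sel(opts):
--     menu_ind = []
--     menu_dict = {}
--     menu = []
--     index = 0
--     d_ind = 0
--     for i in range(0, len(opts)):
--         for o in opts:
--             if index == 0:
--                 menu_ind.append('     < ')
--                 menu_ind.append(o)
--                 menu_ind.append(' >\n')
--             else:
--                 if index == d_ind:
--                     menu_ind.append('     < ')
--                     menu_ind.append(o)
--                     menu_ind.append(' >\n')
--                 else:
--                     menu_ind.append('       ')
--                     menu_ind.append(o)
--                     menu_ind.append('\n')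
--             index += 1
--         menu.append(''.join(menu_ind))
--         menu_ind = []
--         d_ind += len(opts) + 1
--     for i in range(0, len(menu)):
--         menu_dict[i+1] = menu[i]
--     return menu_dict
-- ===== SOURCE B (Python) =====
-- def menu_sel(opts):
--     plain = ['       ' + o + '\n' for o in opts]
--     return {i + 1: ''.join(plain[:i] + ['     < ' + opts[i] + ' >\n'] + plain[i + 1:])
--             for i in range(len(opts))}
-- ===== Notes on version B (the rewrite author's own statement) =====
-- stated objective: simpler
-- what changed: Replaces A's global index/d_ind counter bookkeeping and mutable fragment-list accumulators with a precomputed table of plain lines plus a take/bracket/drop slice assembled per selection in a dict comprehension.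
import Mathlib
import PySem

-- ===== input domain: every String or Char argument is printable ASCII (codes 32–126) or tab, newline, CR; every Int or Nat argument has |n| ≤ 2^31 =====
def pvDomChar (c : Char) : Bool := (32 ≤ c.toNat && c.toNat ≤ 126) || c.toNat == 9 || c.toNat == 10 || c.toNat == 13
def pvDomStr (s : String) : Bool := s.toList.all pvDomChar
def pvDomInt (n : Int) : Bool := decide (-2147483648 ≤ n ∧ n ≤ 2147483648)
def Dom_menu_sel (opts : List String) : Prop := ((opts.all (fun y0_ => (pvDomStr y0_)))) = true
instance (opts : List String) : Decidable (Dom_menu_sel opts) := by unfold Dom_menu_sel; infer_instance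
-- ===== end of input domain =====

-- B replaces A's global index/d_ind counter bookkeeping with a precomputed table of
-- plain lines plus a take/bracket/drop assembly per selection (objective: simpler).

-- ===== PORT A =====
def menuSelInner (d_ind : Int) (p : List String × Int) (o : String) : List String × Int :=
  if p.2 == 0 then (p.1 ++ ["     < ", o, " >\n"], p.2 + 1)
  else if p.2 == d_ind then (p.1 ++ ["     < ", o, " >\n"], p.2 + 1)
  else (p.1 ++ ["       ", o, "\n"], p.2 + 1)

-- state = (menu_ind, menu, index, d_ind)
def menuSelOuter (opts : List String) (st : List String × List String × Int × Int) (_i : Int) :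
    List String × List String × Int × Int :=
  let inner := opts.foldl (menuSelInner st.2.2.2) (st.1, st.2.2.1)
  ([], st.2.1 ++ [PySem.Str.join "" inner.1], inner.2, st.2.2.2 + (PySem.List.len opts + 1))

def menu_sel (opts : List String) : List (Int × String) :=
  let st := (PySem.List.pyRange 0 (PySem.List.len opts) 1).foldl (menuSelOuter opts) ([], [], 0, 0)
  let menu := st.2.1
  ((PySem.List.pyRange 0 (PySem.List.len menu) 1).foldl
      (fun (d : PySem.Dict Int String) i => d.insert (i + 1) (PySem.List.pyGetD menu i ""))
      PySem.Dict.empty).items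

-- ===== PORT B =====
def menu_sel_alt (opts : List String) : List (Int × String) :=
  let plain := opts.map (fun o => "       " ++ o ++ "\n")
  (PySem.List.pyRange 0 (PySem.List.len opts) 1).map (fun i =>
    (i + 1, PySem.Str.join ""
      (PySem.List.slice plain none (some i) ++
       ["     < " ++ PySem.List.pyGetD opts i "" ++ " >\n"] ++
       PySem.List.slice plain (some (i + 1)) none)))

-- ===== PRECONDITION & SPEC =====
def Spec_menu_sel (opts : List String) (out : List (Int × String)) : Prop := out = menu_sel_alt opts
instance (opts : List String) (out : List (Int × String)) : Decidable (Spec_menu_sel opts out) := by unfold Spec_menu_sel; infer_instance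

-- ===== CLAIM (what is proved, stated in full; the proofs are below) =====
def Claim_equal_menu_sel : Prop := ∀ (opts : List String), Dom_menu_sel opts → Spec_menu_sel opts (menu_sel opts)

-- ===== LEMMAS AND PROOFS =====

theorem join_empty_cons (s : String) (rest : List String) :
    PySem.Str.join "" (s :: rest) = s ++ PySem.Str.join "" rest := by
  apply String.toList_inj.mp
  cases rest <;>
    simp [PySem.Str.join, PySem.Chars.join, String.toList_append, List.intercalate]

-- the flat chunk list A's inner loop appends, starting at global counter idx, highlight counter d
def piecesA (l : List String) (idx d : Int) : List String :=
  match l with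
  | [] => []
  | o :: t =>
      (if idx == 0 then ["     < ", o, " >\n"]
       else if idx == d then ["     < ", o, " >\n"]
       else ["       ", o, "\n"]) ++ piecesA t (idx + 1) d

-- the whole menu lines with the bracket at (Int) position j
def selLines (l : List String) (j : Int) : List String :=
  match l with
  | [] => []
  | o :: t =>
      (if j = 0 then "     < " ++ o ++ " >\n" else "       " ++ o ++ "\n") :: selLines t (j - 1)

theorem innerA_eq (l : List String) (d : Int) : ∀ (acc : List String) (idx : Int),
    l.foldl (menuSelInner d) (acc, idx) = (acc ++ piecesA l idx d, idx + l.length) := by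
  induction l with
  | nil => intro acc idx; simp [piecesA]
  | cons o t ih =>
      intro acc idx
      simp only [List.foldl_cons, menuSelInner, piecesA]
      by_cases h0 : idx = 0
      · simp [h0, ih, List.append_assoc]; omega
      · by_cases hd : idx = d
        · simp [hd, ih, List.append_assoc]; omega
        · simp [h0, hd, ih, List.append_assoc]; omega

def menuStr (opts : List String) (k : Nat) : String :=
  PySem.Str.join "" (piecesA opts ((k : Int) * opts.length) ((k : Int) * (opts.length + 1)))

theorem stepA (opts : List String) (menu : List String) (k : Nat) (x : Int) :
    menuSelOuter opts ([], menu, (k : Int) * opts.length, (k : Int) * (opts.length + 1)) x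
      = ([], menu ++ [menuStr opts k],
         ((k + 1 : Nat) : Int) * opts.length, ((k + 1 : Nat) : Int) * (opts.length + 1)) := by
  simp only [menuSelOuter]
  rw [innerA_eq]
  simp only [Prod.mk.injEq]
  refine ⟨trivial, by simp [menuStr], by push_cast; ring, by simp [PySem.List.len_eq]; ring⟩

theorem outerA_eq (opts : List String) : ∀ (L : List Int) (menu : List String) (k : Nat),
    L.foldl (menuSelOuter opts) ([], menu, (k : Int) * opts.length, (k : Int) * (opts.length + 1))
      = ([], menu ++ (List.range L.length).map (fun j => menuStr opts (k + j)),
         ((k + L.length : Nat) : Int) * opts.length,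
         ((k + L.length : Nat) : Int) * (opts.length + 1)) := by
  intro L
  induction L with
  | nil => intro menu k; simp
  | cons x T ih =>
      intro menu k
      simp only [List.foldl_cons]
      rw [stepA, ih (menu ++ [menuStr opts k]) (k + 1)]
      simp only [List.length_cons, Prod.mk.injEq]
      refine ⟨trivial, ?_, by push_cast; ring, by push_cast; ring⟩
      rw [List.range_succ_eq_map]
      simp only [List.map_cons, List.map_map, List.append_assoc, Nat.add_zero,
        List.singleton_append]
      refine congrArg _ (congrArg _ ?_)
      apply List.map_congr_left
      intro j _
      congr 1
      omega

theorem piecesA_join_eq_selLines (l : List String) : ∀ (idx d : Int),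
    (∀ t : Nat, t < l.length → idx + t = 0 → d = idx + t) →
    PySem.Str.join "" (piecesA l idx d) = PySem.Str.join "" (selLines l (d - idx)) := by
  induction l with
  | nil => intro idx d _; simp [piecesA, selLines]
  | cons o t ih =>
      intro idx d H
      have Ht : ∀ t' : Nat, t' < t.length → (idx + 1) + t' = 0 → d = (idx + 1) + t' := by
        intro t' ht' h
        have := H (t' + 1) (by simp; omega) (by push_cast; omega)
        push_cast at this ⊢; omega
      have ihx := ih (idx + 1) d Ht
      simp only [piecesA, selLines]
      by_cases h0 : idx = 0
      · have hd : d = idx := by have := H 0 (by simp) (by omega); omega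
        subst hd; subst h0
        norm_num at ihx
        simp [join_empty_cons, String.append_assoc, ihx]
      · by_cases hd : idx = d
        · subst hd
          have e : idx - (idx + 1) = -1 := by ring
          rw [e] at ihx
          have e2 : idx - idx = 0 := by ring
          simp only [h0, if_false, beq_iff_eq, e2, beq_self_eq_true, if_pos]
          simp [join_empty_cons, String.append_assoc, ihx]
        · have e : d - (idx + 1) = d - idx - 1 := by ring
          rw [e] at ihx
          have hne : ¬ (d - idx = 0) := by omega
          simp [h0, hne, join_empty_cons, String.append_assoc, ihx,
            (by exact hd : idx ≠ d)]

theorem selLines_neg (l : List String) : ∀ (j : Int), j < 0 →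
    selLines l j = l.map (fun o => "       " ++ o ++ "\n") := by
  induction l with
  | nil => intro j _; simp [selLines]
  | cons o t ih =>
      intro j hj
      have : ¬ (j = 0) := by omega
      simp [selLines, this, ih (j - 1) (by omega)]

theorem selLines_take_drop (l : List String) : ∀ (j : Nat), j < l.length →
    selLines l (j : Int)
      = (l.map (fun o => "       " ++ o ++ "\n")).take j
        ++ ["     < " ++ l.getD j "" ++ " >\n"]
        ++ (l.map (fun o => "       " ++ o ++ "\n")).drop (j + 1) := by
  induction l with
  | nil => intro j hj; simp at hj
  | cons o t ih =>
      intro j hj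
      cases j with
      | zero => simp [selLines, selLines_neg t (-1) (by omega)]
      | succ m =>
          have h1 : ¬ ((((m : Nat) + 1 : Nat) : Int) = 0) := by push_cast; omega
          simp only [selLines, h1, reduceIte]
          have h2 : (((m + 1 : Nat) : Int) - 1) = (m : Int) := by push_cast; omega
          rw [h2, ih m (by simpa using hj)]
          simp

-- ===== VERDICT (by name: the statement is the Claim_ definition above) =====
theorem menu_sel_spec : Claim_equal_menu_sel := by
  intro opts _
  unfold Spec_menu_sel menu_sel menu_sel_alt
  have hst := outerA_eq opts (PySem.List.pyRange 0 (PySem.List.len opts) 1) [] 0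
  norm_num at hst
  simp only [PySem.List.len_eq]
  rw [hst]
  simp only [List.length_map, List.length_range]
  rw [PySem.Dict.items_foldl_insert_fresh (PySem.List.pyRange 0 (opts.length : Int) 1)
        (fun i => i + 1)
        (fun i => PySem.List.pyGetD (List.map (fun j => menuStr opts j) (List.range opts.length)) i "")
        PySem.Dict.empty
        (fun a _ => PySem.Dict.contains_empty _)
        (by
          apply List.Nodup.map
          · intro a b h; simp only [] at h; omega
          · exact PySem.List.nodup_pyRange_one 0 (opts.length : Int))]
  rw [show (PySem.Dict.empty : PySem.Dict Int String).items = [] from rfl, List.nil_append]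
  apply List.map_congr_left
  intro i hi
  have hmem := (PySem.List.mem_pyRange_one).mp hi
  obtain ⟨k, hk, rfl⟩ : ∃ k : Nat, k < opts.length ∧ (k : Int) = i := by
    refine ⟨i.toNat, by omega, by omega⟩
  refine congrArg (Prod.mk ((k : Int) + 1)) ?_
  -- A's entry value = menuStr opts k
  rw [PySem.List.pyGetD_natCast, PySem.List.getD_map_range _ _ _ _ hk]
  -- B's entry value
  rw [PySem.List.slice_to_natCast,
      show ((k : Int) + 1) = ((k + 1 : Nat) : Int) by push_cast; ring,
      PySem.List.slice_from_natCast, PySem.List.pyGetD_natCast]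
  -- chain through selLines
  have hH : ∀ t : Nat, t < opts.length →
      (k : Int) * opts.length + t = 0 →
      (k : Int) * ((opts.length : Int) + 1) = (k : Int) * opts.length + t := by
    intro t ht h
    have hnn : (0 : Int) ≤ (k : Int) * (opts.length : Int) := by positivity
    have h1 : (k : Int) * (opts.length : Int) = 0 ∧ (t : Int) = 0 := by omega
    have h2 : (k : Int) = 0 ∨ ((opts.length : Int)) = 0 := mul_eq_zero.mp h1.1
    have h3 : (k : Int) = 0 := by
      rcases h2 with h2 | h2
      · exact h2
      · exfalso; omega
    rw [h3]; simp [h1.2]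
  have hchain := piecesA_join_eq_selLines opts ((k : Int) * opts.length)
      ((k : Int) * ((opts.length : Int) + 1)) hH
  have harg : (k : Int) * ((opts.length : Int) + 1) - (k : Int) * opts.length = (k : Int) := by ring
  rw [harg] at hchain
  rw [menuStr, hchain, selLines_take_drop opts k hk]
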